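-- pv_equiv track=rewrite | github.com/Weless/leetcode | python/数组/1170. 比较字符串最小字母出现频次.py | numSmallerByFrequency
-- ===== SOURCE A (Python) =====
-- from typing import List
--
-- def numSmallerByFrequency(queries: List[str], words: List[str]) -> List[int]:
--     from collections import Counter
--     def f(s):
--         if not s:
--             return 0
--         d = dict(Counter(s))
--         return sorted(d.items(),key=lambda x:(x[0],[1]))[0][1]
--     queries = list(map(f,queries))
--     words = list(map(f,words))
--     res = []
--     for i in queries:
--         c = 0
--         for j in words:
--             if i<j:
--                 c+=1
--         res.append(c)
--     return res
-- ===== SOURCE B (Python) =====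
-- from typing import List
--
-- def numSmallerByFrequency(queries: List[str], words: List[str]) -> List[int]:
--     def f(s):
--         if not s:
--             return 0
--         m = min(s)
--         c = 0
--         for ch in s:
--             if ch == m:
--                 c += 1
--         return c
--     freqs = sorted(f(w) for w in words)
--     n = len(words)
--     res = []
--     for q in queries:
--         x = f(q)
--         lo, hi = 0, n
--         while lo < hi:
--             mid = (lo + hi) // 2
--             if freqs[mid] <= x:
--                 lo = mid + 1
--             else:
--                 hi = mid
--         res.append(n - lo)
--     return res
-- ===== Notes on version B (the rewrite author's own statement) =====
-- stated objective: faster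
-- what changed: B replaces A's Counter/dict-sort helper by count-of-min-char and A's per-query linear scan over all word frequencies by one sort of the word frequencies followed by a binary search per query.
import Mathlib
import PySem

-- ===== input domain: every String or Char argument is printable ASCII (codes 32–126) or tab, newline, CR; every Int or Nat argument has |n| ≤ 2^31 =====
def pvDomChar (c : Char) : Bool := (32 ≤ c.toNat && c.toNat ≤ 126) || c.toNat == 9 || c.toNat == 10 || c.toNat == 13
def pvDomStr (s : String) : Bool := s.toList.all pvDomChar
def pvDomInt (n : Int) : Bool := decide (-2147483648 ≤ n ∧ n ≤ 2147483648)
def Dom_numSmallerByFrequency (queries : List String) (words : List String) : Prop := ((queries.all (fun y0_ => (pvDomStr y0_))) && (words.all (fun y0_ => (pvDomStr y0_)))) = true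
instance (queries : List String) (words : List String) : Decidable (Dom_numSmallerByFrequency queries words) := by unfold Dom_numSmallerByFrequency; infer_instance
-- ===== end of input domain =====

-- ===== PORT A =====
-- B replaces A's per-query linear scan over all word frequencies by one sort of the
-- word frequencies plus a binary search per query (objective: faster).
-- A's helper f: dict(Counter(s)) sorted by key (x[0], [1]); the second key component is the
-- constant list [1], so the ordering is by x[0] alone and the port sorts by the first component.
-- sorted(...)[0][1]: the [0] is ported as pyGetD ... 0 (in range: s nonempty makes the items nonempty).
def pvFA (s : String) : Int :=
  if s.toList = [] then 0
  else (PySem.List.pyGetD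
          (PySem.List.sorted (PySem.Dict.counter s.toList).items (fun x => x.1)) 0 (' ', 0)).2

def numSmallerByFrequency (queries : List String) (words : List String) : List Int :=
  let qs := queries.map pvFA
  let ws := words.map pvFA
  qs.foldl (fun res i => res ++ [ws.foldl (fun c j => if i < j then c + 1 else c) (0 : Int)]) []

-- ===== PORT B =====
-- B's helper f: min(s) returns a one-character string in Python; its ordering coincides with
-- the character order, so the port takes the minimum character of s.toList.
def pvFB (s : String) : Int :=
  match PySem.List.min? s.toList (fun c => c) with
  | none => 0
  | some m => s.toList.foldl (fun c ch => if ch == m then c + 1 else c) (0 : Int)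

-- the 'while lo < hi' binary-search loop of Source B; freqs[mid] is in range (lo < hi ≤ len freqs
-- at every call), so the total-form getD is exact.
def pvBisect (freqs : List Int) (x : Int) (lo hi : Nat) : Nat :=
  if lo < hi then
    let mid := (lo + hi) / 2
    if freqs.getD mid 0 ≤ x then pvBisect freqs x (mid + 1) hi
    else pvBisect freqs x lo mid
  else lo
termination_by hi - lo
decreasing_by all_goals omega

def numSmallerByFrequency_alt (queries : List String) (words : List String) : List Int :=
  let freqs := PySem.List.sorted (words.map pvFB) (fun v => v)
  let n := words.length
  queries.foldl
    (fun res q => res ++ [(n : Int) - (pvBisect freqs (pvFB q) 0 n : Int)]) []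

-- ===== PRECONDITION & SPEC =====
def Spec_numSmallerByFrequency (queries : List String) (words : List String) (out : List Int) : Prop := out = numSmallerByFrequency_alt queries words
instance (queries : List String) (words : List String) (out : List Int) : Decidable (Spec_numSmallerByFrequency queries words out) := by unfold Spec_numSmallerByFrequency; infer_instance

-- ===== CLAIM (what is proved, stated in full; the proofs are below) =====
def Claim_equal_numSmallerByFrequency : Prop := ∀ (queries : List String) (words : List String), Dom_numSmallerByFrequency queries words → Spec_numSmallerByFrequency queries words (numSmallerByFrequency queries words)

-- ===== LEMMAS AND PROOFS =====

-- A's helper (count of the least key of Counter(s)) and B's helper (count of min(s)) agree.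
theorem pvF_eq : pvFA = pvFB := by
  funext s
  unfold pvFA pvFB
  rcases h : PySem.List.min? s.toList (fun c => c) with _ | m
  · have h0 : s.toList = [] := (PySem.List.min?_eq_none_iff _ _).mp h
    simp [h0]
  · have hne : s.toList ≠ [] := by
      intro h0
      rw [h0, (PySem.List.min?_eq_none_iff ([] : List Char) (fun c => c)).mpr rfl] at h
      simp at h
    rw [if_neg hne]
    dsimp only
    rw [PySem.List.foldl_beq_add_one]
    have hitems : (PySem.Dict.counter s.toList).items
        = (PySem.Set.ofList s.toList).map (fun k => (k, (s.toList.count k : Int))) :=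
      PySem.Dict.items_counter s.toList
    have hmmem : m ∈ s.toList := PySem.List.min?_mem h
    have hnil : PySem.List.sorted (PySem.Dict.counter s.toList).items (fun x => x.1) ≠ [] := by
      rw [Ne, PySem.List.sorted_eq_nil_iff, hitems, List.map_eq_nil_iff]
      exact List.ne_nil_of_mem ((PySem.Set.mem_ofList _ m).mpr hmmem)
    rcases hs : PySem.List.sorted (PySem.Dict.counter s.toList).items (fun x => x.1) with _ | ⟨p, t⟩
    · exact absurd hs hnil
    rw [PySem.List.pyGetD_zero_cons]
    have hpmem : p ∈ (PySem.Dict.counter s.toList).items :=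
      (PySem.List.mem_sorted _ _ _ p).mp (hs ▸ List.mem_cons_self)
    rw [hitems] at hpmem
    obtain ⟨c, hc, rfl⟩ := List.mem_map.mp hpmem
    have hmin1 := PySem.List.key_head_sorted_le _ (fun x : Char × Int => x.1) hs
    have hmle := PySem.List.min?_isMin h
    have hcm : c = m := by
      refine le_antisymm ?_ (hmle c ((PySem.Set.mem_ofList _ c).mp hc))
      have := hmin1 (m, (s.toList.count m : Int))
        (by rw [hitems]; exact List.mem_map.mpr ⟨m, (PySem.Set.mem_ofList _ m).mpr hmmem, rfl⟩)
      simpa using this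
    simp [hcm]

-- if positions below k hold values ≤ x and positions from k on hold values > x,
-- then the number of values > x is length - k
theorem pvCountGt (l : List Int) (x : Int) : ∀ (k : Nat), k ≤ l.length →
    (∀ j, j < k → l.getD j 0 ≤ x) →
    (∀ j, k ≤ j → j < l.length → x < l.getD j 0) →
    l.countP (fun v => decide (x < v)) = l.length - k := by
  induction l with
  | nil => intro k hk _ _; simp at hk ⊢
  | cons a t ih =>
    intro k hk h1 h2
    cases k with
    | zero =>
      have hall : ∀ v ∈ a :: t, (fun v => decide (x < v)) v = true := by
        intro v hv
        rcases List.mem_iff_getElem.mp hv with ⟨i, hi, rfl⟩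
        have := h2 i (Nat.zero_le _) hi
        rw [List.getD_eq_getElem _ _ hi] at this
        simpa using this
      rw [List.countP_eq_length.mpr hall]
      omega
    | succ k' =>
      have ha : a ≤ x := by have := h1 0 (Nat.succ_pos _); simpa using this
      have hfa : (fun v => decide (x < v)) a = false := by simp [not_lt.mpr ha]
      rw [List.countP_cons_of_neg (by simp [hfa])]
      have ht := ih k' (by simpa using hk)
        (fun j hj => by have := h1 (j + 1) (by omega); simpa using this)
        (fun j hj hjl => by
          have := h2 (j + 1) (by omega) (by simpa using hjl)
          simpa using this)
      rw [ht]
      simp [List.length_cons]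

-- the binary-search loop's invariant: it returns the split point between ≤ x and > x
theorem pvBisect_inv (freqs : List Int) (x : Int)
    (hmono : ∀ p q : Nat, p ≤ q → q < freqs.length → freqs.getD p 0 ≤ freqs.getD q 0) :
    ∀ (n lo hi : Nat), hi - lo = n → lo ≤ hi → hi ≤ freqs.length →
    (∀ j, j < lo → freqs.getD j 0 ≤ x) →
    (∀ j, hi ≤ j → j < freqs.length → x < freqs.getD j 0) →
    pvBisect freqs x lo hi ≤ freqs.length ∧
    (∀ j, j < pvBisect freqs x lo hi → freqs.getD j 0 ≤ x) ∧
    (∀ j, pvBisect freqs x lo hi ≤ j → j < freqs.length → x < freqs.getD j 0) := by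
  intro n
  induction n using Nat.strong_induction_on with
  | _ n ih =>
    intro lo hi hn hlh hhi h1 h2
    rw [pvBisect]
    split
    case isTrue hlt =>
      dsimp only
      split
      case isTrue hle =>
        refine ih (hi - ((lo + hi) / 2 + 1)) (by omega) _ _ rfl (by omega) hhi ?_ h2
        intro j hj
        exact le_trans (hmono j ((lo + hi) / 2) (by omega) (by omega)) hle
      case isFalse hgt =>
        refine ih ((lo + hi) / 2 - lo) (by omega) _ _ rfl (by omega) (by omega) h1 ?_
        intro j hj hjl
        exact lt_of_lt_of_le (not_le.mp hgt) (hmono ((lo + hi) / 2) j hj hjl)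
    case isFalse hge =>
      have : lo = hi := by omega
      subst this
      exact ⟨by omega, h1, h2⟩

-- per query: A's scan-count equals B's length-minus-binary-search on the sorted frequencies
theorem pvElem (x : Int) (ws : List Int) :
    (0 : Int) + (ws.countP (fun v => decide (x < v)) : Int) =
      (ws.length : Int) - (pvBisect (PySem.List.sorted ws (fun v => v)) x 0 ws.length : Int) := by
  have hlen : (PySem.List.sorted ws (fun v => v)).length = ws.length :=
    PySem.List.length_sorted ws (fun v => v) false
  have hmono : ∀ p q : Nat, p ≤ q → q < (PySem.List.sorted ws (fun v => v)).length →
      (PySem.List.sorted ws (fun v => v)).getD p 0 ≤ (PySem.List.sorted ws (fun v => v)).getD q 0 := by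
    intro p q hpq hq
    rw [List.getD_eq_getElem _ _ (lt_of_le_of_lt hpq hq), List.getD_eq_getElem _ _ hq]
    exact PySem.List.sorted_id_getElem_mono ws hpq hq
  obtain ⟨hk, hA, hB⟩ := pvBisect_inv (PySem.List.sorted ws (fun v => v)) x hmono
    ws.length 0 ws.length (by omega) (Nat.zero_le _) (by omega)
    (fun j hj => absurd hj (by omega)) (fun j hj hjl => absurd hjl (by omega))
  have hcount := pvCountGt (PySem.List.sorted ws (fun v => v)) x _ hk hA hB
  have hperm := (PySem.List.sorted_perm ws (fun v => v) false).countP_eq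
    (p := fun v => decide (x < v))
  omega

-- ===== VERDICT (by name: the statement is the Claim_ definition above) =====
theorem numSmallerByFrequency_spec : Claim_equal_numSmallerByFrequency := by
  intro queries words _
  unfold Spec_numSmallerByFrequency numSmallerByFrequency numSmallerByFrequency_alt
  simp only [PySem.List.foldl_append_singleton_eq_map, List.nil_append, List.map_map]
  refine List.map_congr_left ?_
  intro q _
  simp only [Function.comp, pvF_eq, PySem.List.foldl_ite_add_one]
  have := pvElem (pvFB q) (words.map pvFB)
  rw [List.length_map] at this
  omega
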